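-- pv_equiv track=rewrite | github.com/Wajktor13/concurrent-gaussian-elimination | implementation/graph_foata_generator/main.py | get_dependency_relation
-- ===== SOURCE A (Python) =====
-- def get_dependency_relation(operations):
--     """
--     algorithm:
--     for all pairs of operations check if one of them saves to a variable from
--     which the other operation reads and vice versa - if at least one of this
--     conditions is fulfilled, the pair of operations is added to the dependecy
--     relation (dr)
--     """
--
--     dr = []
--
--     for op_id1, op1 in operations.items():
--         save_to1 = op1[0]
--         read_from1 = op1[1]
--
--         for op_id2, op2 in operations.items():
--             save_to2 = op2[0]
--             read_from2 = op2[1]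
--
--             if save_to1 in read_from2 or save_to2 in read_from1:
--                 dr.append((op_id1, op_id2))
--
--     # set for uniqueness
--     return  sorted(list(set(dr)))
-- ===== SOURCE B (Python) =====
-- def get_dependency_relation(operations):
--     # inverted index: variable -> set of op_ids that read it
--     readers = {}
--     for op_id, op in operations.items():
--         for var in op[1]:
--             readers.setdefault(var, set()).add(op_id)
--     pairs = set()
--     for op_id, op in operations.items():
--         for reader in readers.get(op[0], ()):
--             pairs.add((op_id, reader))
--             pairs.add((reader, op_id))
--     return sorted(pairs)
-- ===== Notes on version B (the rewrite author's own statement) =====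
-- stated objective: faster
-- what changed: Replaces A's all-pairs double scan over operations.items() with an inverted index variable -> set of reader op_ids built in one pass, then one pass emitting both ordered pairs per (writer, reader) hit, collected in a set and sorted.
import Mathlib
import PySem

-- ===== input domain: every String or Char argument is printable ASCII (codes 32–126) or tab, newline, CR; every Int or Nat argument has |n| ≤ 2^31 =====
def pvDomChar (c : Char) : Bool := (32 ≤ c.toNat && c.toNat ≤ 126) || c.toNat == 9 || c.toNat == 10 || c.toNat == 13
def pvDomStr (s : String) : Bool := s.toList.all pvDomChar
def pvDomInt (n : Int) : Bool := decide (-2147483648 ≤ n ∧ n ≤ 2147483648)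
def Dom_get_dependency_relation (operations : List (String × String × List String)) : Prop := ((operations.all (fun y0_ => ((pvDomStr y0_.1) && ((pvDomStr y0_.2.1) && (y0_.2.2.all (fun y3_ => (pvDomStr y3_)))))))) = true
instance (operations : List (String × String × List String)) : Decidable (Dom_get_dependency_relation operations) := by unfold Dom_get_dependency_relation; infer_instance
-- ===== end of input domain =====

-- B replaces A's all-pairs scan by an inverted index variable -> set of reading op_ids, touching only dependent pairs; equal return value proved.

-- ===== PORT A =====
-- operations is a Python dict: the assoc-list argument is read through PySem.Dict.ofList
def get_dependency_relation (operations : List (String × String × List String)) : List (String × String) :=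
  let items := (PySem.Dict.ofList operations).items
  let dr : List (String × String) :=
    items.foldl (fun dr p1 =>
      items.foldl (fun dr p2 =>
        if p1.2.1 ∈ p2.2.2 ∨ p2.2.1 ∈ p1.2.2 then dr ++ [(p1.1, p2.1)] else dr) dr) []
  -- sorted(list(set(dr))): Python sorts the pairs lexicographically
  PySem.List.sorted2 (PySem.Set.ofList dr) Prod.fst Prod.snd false

-- ===== PORT B =====
def get_dependency_relation_alt (operations : List (String × String × List String)) : List (String × String) :=
  let items := (PySem.Dict.ofList operations).items
  let readers : PySem.Dict String (PySem.Set String) :=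
    items.foldl (fun d p =>
      p.2.2.foldl (fun d v => d.insert v (PySem.Set.add (d.getD v PySem.Set.empty) p.1)) d)
      PySem.Dict.empty
  let pairs : PySem.Set (String × String) :=
    items.foldl (fun s p =>
      (readers.getD p.2.1 PySem.Set.empty).foldl
        (fun s r => PySem.Set.add (PySem.Set.add s (p.1, r)) (r, p.1)) s)
      PySem.Set.empty
  PySem.List.sorted2 pairs Prod.fst Prod.snd false

-- ===== PRECONDITION & SPEC =====
def Spec_get_dependency_relation (operations : List (String × String × List String)) (out : List (String × String)) : Prop := out = get_dependency_relation_alt operations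
instance (operations : List (String × String × List String)) (out : List (String × String)) : Decidable (Spec_get_dependency_relation operations out) := by unfold Spec_get_dependency_relation; infer_instance

-- ===== CLAIM (what is proved, stated in full; the proofs are below) =====
def Claim_equal_get_dependency_relation : Prop := ∀ (operations : List (String × String × List String)), Dom_get_dependency_relation operations → Spec_get_dependency_relation operations (get_dependency_relation operations)

-- ===== LEMMAS AND PROOFS =====

-- sorted2 of two nodup lists with the same members, under an injective combined key, coincide
theorem pv_sorted2_eq_sorted_lex {α κ₁ κ₂ : Type} [LinearOrder κ₁] [LinearOrder κ₂]
    (xs : List α) (k1 : α → κ₁) (k2 : α → κ₂) :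
    PySem.List.sorted2 xs k1 k2 false
      = PySem.List.sorted xs (fun a => toLex (k1 a, k2 a)) false := by
  rw [PySem.List.sorted_eq_foldl_insertBy]
  unfold PySem.List.sorted2
  have hbefore : (fun a b => decide (k1 a < k1 b) || (!decide (k1 b < k1 a) && decide (k2 a < k2 b)))
      = (fun a b => decide ((toLex ((k1 a), (k2 a)) : Lex (κ₁ × κ₂)) < toLex ((k1 b), (k2 b)))) := by
    funext a b
    by_cases h1 : k1 a < k1 b
    · simp [h1, Prod.Lex.lt_iff]
    · by_cases h2 : k1 b < k1 a
      · simp [h1, h2, Prod.Lex.lt_iff]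
        intro h; exact absurd h (ne_of_gt h2)
      · have : k1 a = k1 b := le_antisymm (not_lt.mp h2) (not_lt.mp h1)
        simp [this, Prod.Lex.lt_iff]
  simp only [hbefore]
  simp

theorem pv_sorted2_eq_of_perm {α κ₁ κ₂ : Type} [LinearOrder κ₁] [LinearOrder κ₂]
    (xs ys : List α) (k1 : α → κ₁) (k2 : α → κ₂)
    (hinj : Function.Injective (fun a => (k1 a, k2 a)))
    (hp : xs.Perm ys) :
    PySem.List.sorted2 xs k1 k2 false = PySem.List.sorted2 ys k1 k2 false := by
  rw [pv_sorted2_eq_sorted_lex, pv_sorted2_eq_sorted_lex]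
  exact PySem.List.sorted_eq_sorted_of_perm xs ys _
    (fun a b h => hinj (toLex.injective h)) hp

-- loop shapes for port A's double loop
theorem pv_foldl_if_append {β γ : Type} (l : List β) (c : β → Prop) [DecidablePred c]
    (f : β → γ) (acc : List γ) :
    l.foldl (fun a x => if c x then a ++ [f x] else a) acc
      = acc ++ (l.filter (fun x => decide (c x))).map f := by
  induction l generalizing acc with
  | nil => simp
  | cons x t ih =>
    by_cases h : c x <;> simp [List.foldl_cons, h, ih]

theorem pv_foldl_flat {β γ : Type} (l : List β) (g : β → List γ) (acc : List γ) :
    l.foldl (fun a x => a ++ g x) acc = acc ++ l.flatMap g := by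
  induction l generalizing acc with
  | nil => simp
  | cons x t ih => simp [List.foldl_cons, ih]

-- a foldl whose step preserves Nodup preserves Nodup
theorem pv_nodup_foldl {β γ : Type} (l : List β) (f : PySem.Set γ → β → PySem.Set γ)
    (h : ∀ s x, List.Nodup s → List.Nodup (f s x)) :
    ∀ s : PySem.Set γ, List.Nodup s → List.Nodup (l.foldl f s) := by
  induction l with
  | nil => intro s hs; simpa using hs
  | cons x t ih => intro s hs; exact ih _ (h s x hs)

-- membership in the inverted index built by B
theorem pv_mem_step (p : String × String × List String)
    (d : PySem.Dict String (PySem.Set String)) (j v : String) :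
    (j ∈ (p.2.2.foldl (fun d w => d.insert w (PySem.Set.add (d.getD w PySem.Set.empty) p.1)) d).getD v PySem.Set.empty)
      ↔ j ∈ d.getD v PySem.Set.empty ∨ (p.1 = j ∧ v ∈ p.2.2) := by
  obtain ⟨i, s, rs⟩ := p
  induction rs generalizing d with
  | nil => simp
  | cons w ws ih =>
    simp only [List.foldl_cons, ih, List.mem_cons]
    by_cases hv : v = w
    · subst hv
      simp [PySem.Set.mem_add]
      aesop
    · simp only [PySem.Dict.getD_insert, hv, if_false]
      aesop

theorem pv_mem_readers (items : List (String × String × List String)) (j v : String) :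
    (j ∈ (items.foldl (fun d p =>
        p.2.2.foldl (fun d w => d.insert w (PySem.Set.add (d.getD w PySem.Set.empty) p.1)) d)
        PySem.Dict.empty).getD v PySem.Set.empty)
      ↔ ∃ p ∈ items, p.1 = j ∧ v ∈ p.2.2 := by
  suffices h : ∀ d : PySem.Dict String (PySem.Set String),
      (j ∈ (items.foldl (fun d p =>
        p.2.2.foldl (fun d w => d.insert w (PySem.Set.add (d.getD w PySem.Set.empty) p.1)) d)
        d).getD v PySem.Set.empty)
      ↔ j ∈ d.getD v PySem.Set.empty ∨ ∃ p ∈ items, p.1 = j ∧ v ∈ p.2.2 by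
    rw [h]; simp [PySem.Dict.empty, PySem.Dict.getD, PySem.Dict.get?, PySem.Set.empty]
  induction items with
  | nil => intro d; simp
  | cons p t ih =>
    intro d
    simp only [List.foldl_cons, ih, pv_mem_step, List.mem_cons]
    aesop

-- membership in B's pairs accumulator
theorem pv_mem_inner (rs : List String) (i : String) (s : PySem.Set (String × String))
    (x : String × String) :
    (x ∈ rs.foldl (fun s r => PySem.Set.add (PySem.Set.add s (i, r)) (r, i)) s)
      ↔ x ∈ s ∨ ∃ r ∈ rs, x = (i, r) ∨ x = (r, i) := by
  induction rs generalizing s with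
  | nil => simp
  | cons r t ih =>
    simp only [List.foldl_cons, ih, PySem.Set.mem_add, List.mem_cons]
    aesop

theorem pv_mem_pairs (items : List (String × String × List String))
    (readers : PySem.Dict String (PySem.Set String)) (x : String × String) :
    (x ∈ items.foldl (fun s p =>
        (readers.getD p.2.1 PySem.Set.empty).foldl
          (fun s r => PySem.Set.add (PySem.Set.add s (p.1, r)) (r, p.1)) s)
        PySem.Set.empty)
      ↔ ∃ p ∈ items, ∃ r ∈ readers.getD p.2.1 PySem.Set.empty, x = (p.1, r) ∨ x = (r, p.1) := by
  suffices h : ∀ s : PySem.Set (String × String),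
      (x ∈ items.foldl (fun s p =>
        (readers.getD p.2.1 PySem.Set.empty).foldl
          (fun s r => PySem.Set.add (PySem.Set.add s (p.1, r)) (r, p.1)) s) s)
      ↔ x ∈ s ∨ ∃ p ∈ items, ∃ r ∈ readers.getD p.2.1 PySem.Set.empty, x = (p.1, r) ∨ x = (r, p.1) by
    rw [h]; simp [PySem.Set.empty]
  induction items with
  | nil => intro s; simp
  | cons p t ih =>
    intro s
    simp only [List.foldl_cons, ih, pv_mem_inner, List.mem_cons]
    aesop

-- ===== VERDICT (by name: the statement is the Claim_ definition above) =====
theorem get_dependency_relation_spec : Claim_equal_get_dependency_relation := by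
  intro operations _
  unfold Spec_get_dependency_relation get_dependency_relation get_dependency_relation_alt
  simp only []
  set items := (PySem.Dict.ofList operations).items with hitems
  apply pv_sorted2_eq_of_perm
  · intro a b h
    simpa [Prod.ext_iff] using h
  · -- the two nodup lists have the same members
    apply (List.perm_ext_iff_of_nodup (PySem.Set.nodup_ofList _) ?nodup).mpr
    case nodup =>
      apply pv_nodup_foldl _ _ ?_ _ List.nodup_nil
      intro s p hs
      exact pv_nodup_foldl _ _ (fun s r hsr => PySem.Set.nodup_add _ _ (PySem.Set.nodup_add _ _ hsr)) _ hs
    intro x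
    rw [PySem.Set.mem_ofList, pv_mem_pairs]
    conv_lhs =>
      rw [show (items.foldl (fun dr p1 =>
        items.foldl (fun dr p2 =>
          if p1.2.1 ∈ p2.2.2 ∨ p2.2.1 ∈ p1.2.2 then dr ++ [(p1.1, p2.1)] else dr) dr) [])
        = items.flatMap (fun p1 =>
            (items.filter (fun p2 => decide (p1.2.1 ∈ p2.2.2 ∨ p2.2.1 ∈ p1.2.2))).map
              (fun p2 => (p1.1, p2.1))) from by
        rw [show (fun (dr : List (String × String)) (p1 : String × String × List String) =>
            items.foldl (fun dr p2 =>
              if p1.2.1 ∈ p2.2.2 ∨ p2.2.1 ∈ p1.2.2 then dr ++ [(p1.1, p2.1)] else dr) dr)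
          = (fun dr p1 => dr ++ (items.filter (fun p2 => decide (p1.2.1 ∈ p2.2.2 ∨ p2.2.1 ∈ p1.2.2))).map (fun p2 => (p1.1, p2.1))) from by
            funext dr p1; exact pv_foldl_if_append items _ _ dr]
        rw [pv_foldl_flat]; simp]
    simp only [List.mem_flatMap, List.mem_map, List.mem_filter, decide_eq_true_eq]
    constructor
    · rintro ⟨p1, hp1, p2, ⟨hp2, hc⟩, hx⟩
      rcases hc with hc | hc
      · exact ⟨p1, hp1, p2.1, (pv_mem_readers items p2.1 p1.2.1).mpr ⟨p2, hp2, rfl, hc⟩, Or.inl hx.symm⟩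
      · exact ⟨p2, hp2, p1.1, (pv_mem_readers items p1.1 p2.2.1).mpr ⟨p1, hp1, rfl, hc⟩, Or.inr hx.symm⟩
    · rintro ⟨p, hp, r, hr, hx | hx⟩
      · obtain ⟨q, hq, hq1, hqr⟩ := (pv_mem_readers items r p.2.1).mp hr
        exact ⟨p, hp, q, ⟨hq, Or.inl hqr⟩, by rw [hq1, hx]⟩
      · obtain ⟨q, hq, hq1, hqr⟩ := (pv_mem_readers items r p.2.1).mp hr
        exact ⟨q, hq, p, ⟨hp, Or.inr hqr⟩, by rw [hq1, hx]⟩
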